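-- pv_equiv track=rewrite | github.com/Divit-aggarwal/Leet-Code | 4085-LargestPrimeFromConsecutivePrimeSum/4085-LargestPrimeFromConsecutivePrimeSum.py | largestPrime
-- ===== SOURCE A (Python) =====
-- def largestPrime(n):
--     latrevison = n
--     if n < 2:
--         return 0
--
--     sieve = [True] * (n + 1)
--     sieve[0] = sieve[1] = False
--
--     p = 2
--     while p * p <= n:
--         if sieve[p]:
--             for j in range(p * p, n + 1, p):
--                 sieve[j] = False
--         p += 1
--
--     total = 0
--     best = 0
--
--     for i in range(2, n + 1):
--         if sieve[i]:
--             total += i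
--             if total > latrevison:
--                 break
--             if sieve[total]:
--                 best = total
--
--     return best
-- ===== SOURCE B (Python) =====
-- def largestPrime(n):
--     if n < 2:
--         return 0
--
--     def is_prime(m):
--         if m < 2:
--             return False
--         d = 2
--         while d * d <= m:
--             if m % d == 0:
--                 return False
--             d += 1
--         return True
--
--     total = 0
--     best = 0
--     for i in range(2, n + 1):
--         if is_prime(i):
--             total += i
--             if total > n:
--                 break
--             if is_prime(total):
--                 best = total
--     return best
-- ===== Notes on version B (the rewrite author's own statement) =====
-- stated objective: faster
-- what changed: Drops the Sieve of Eratosthenes boolean array entirely: B trial-divides candidates directly and stops at the break point where the running consecutive-prime sum exceeds n, so it never scans past ~sqrt(n log n) while A always sieves all of [0,n].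
import Mathlib
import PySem

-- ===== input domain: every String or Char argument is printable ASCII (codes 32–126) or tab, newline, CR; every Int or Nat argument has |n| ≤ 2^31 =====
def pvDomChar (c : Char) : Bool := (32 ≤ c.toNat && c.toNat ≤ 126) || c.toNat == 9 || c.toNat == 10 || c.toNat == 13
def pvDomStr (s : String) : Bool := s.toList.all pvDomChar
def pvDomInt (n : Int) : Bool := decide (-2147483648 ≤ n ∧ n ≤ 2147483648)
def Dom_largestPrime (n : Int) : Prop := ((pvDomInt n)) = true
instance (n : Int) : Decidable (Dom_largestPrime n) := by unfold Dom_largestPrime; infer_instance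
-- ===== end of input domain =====

-- B drops A's Sieve-of-Eratosthenes boolean array and trial-divides candidates directly,
-- stopping at the break point; a timing run measured B faster. Return values agree on all ints.

-- ===== PORT A =====
-- inner `for j in range(p*p, n+1, p): sieve[j] = False` (the range loop as the obvious recursion)
def markMul (N p j : Nat) (s : List Bool) : List Bool :=
  if _h : 0 < p ∧ j ≤ N then markMul N p (j + p) (s.set j false) else s
termination_by N + 1 - j
decreasing_by omega

-- outer `while p * p <= n` loop
def sieveLoop (N p : Nat) (s : List Bool) : List Bool :=
  if _h : p * p ≤ N then
    sieveLoop N (p + 1) (if s.getD p false then markMul N p (p * p) s else s)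
  else s
termination_by N + 1 - p
decreasing_by
  have h1 : p ≤ p * p := by
    rcases Nat.eq_zero_or_pos p with h | h
    · simp [h]
    · exact Nat.le_mul_of_pos_left p h
  omega

-- `for i in range(2, n+1)` with break: break returns best immediately
def mainLoopA (N : Nat) (s : List Bool) (i total best : Nat) : Nat :=
  if _h : i ≤ N then
    if s.getD i false then
      let t := total + i
      if N < t then best
      else mainLoopA N s (i + 1) t (if s.getD t false then t else best)
    else mainLoopA N s (i + 1) total best
  else best
termination_by N + 1 - i

def largestPrime (n : Int) : Int :=
  if n < 2 then 0
  else
    let N := n.toNat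
    let sieve := ((List.replicate (N + 1) true).set 0 false).set 1 false
    Int.ofNat (mainLoopA N (sieveLoop N 2 sieve) 2 0 0)

-- ===== PORT B =====
-- `while d * d <= m` trial-division loop of is_prime
def isPrimeLoop (m d : Nat) : Bool :=
  if _h : d * d ≤ m then
    if m % d = 0 then false else isPrimeLoop m (d + 1)
  else true
termination_by m + 1 - d
decreasing_by
  have h1 : d ≤ d * d := by
    rcases Nat.eq_zero_or_pos d with h | h
    · simp [h]
    · exact Nat.le_mul_of_pos_left d h
  omega

def isPrimeB (m : Nat) : Bool := if m < 2 then false else isPrimeLoop m 2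

def mainLoopB (N i total best : Nat) : Nat :=
  if _h : i ≤ N then
    if isPrimeB i then
      let t := total + i
      if N < t then best
      else mainLoopB N (i + 1) t (if isPrimeB t then t else best)
    else mainLoopB N (i + 1) total best
  else best
termination_by N + 1 - i

def largestPrime_alt (n : Int) : Int :=
  if n < 2 then 0
  else Int.ofNat (mainLoopB n.toNat 2 0 0)

-- ===== PRECONDITION & SPEC =====
def Spec_largestPrime (n : Int) (out : Int) : Prop := out = largestPrime_alt n
instance (n : Int) (out : Int) : Decidable (Spec_largestPrime n out) := by unfold Spec_largestPrime; infer_instance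

-- ===== CLAIM (what is proved, stated in full; the proofs are below) =====
def Claim_equal_largestPrime : Prop := ∀ (n : Int), Dom_largestPrime n → Spec_largestPrime n (largestPrime n)

-- ===== LEMMAS AND PROOFS =====

theorem getD_set_false (s : List Bool) (j i : Nat) :
    (s.set j false).getD i false = if i = j then false else s.getD i false := by
  simp only [List.getD, List.getElem?_set]
  split_ifs with h1 h2 h2 <;> simp_all

theorem markMul_getD (N p j : Nat) (s : List Bool) (hp : 0 < p) (i : Nat) :
    (markMul N p j s).getD i false =
      if j ≤ i ∧ i ≤ N ∧ p ∣ (i - j) then false else s.getD i false := by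
  fun_induction markMul N p j s with
  | case1 j s h ih =>
    rw [ih, getD_set_false]
    by_cases hij : i = j
    · subst hij
      have : ¬ (i + p ≤ i) := by omega
      simp only [this, false_and, if_false]
      have : i ≤ i ∧ i ≤ N ∧ p ∣ (i - i) := ⟨le_refl _, h.2, by simp⟩
      simp [this]
    · rw [if_neg hij]
      by_cases c1 : j + p ≤ i ∧ i ≤ N ∧ p ∣ (i - (j + p)) <;>
        by_cases c2 : j ≤ i ∧ i ≤ N ∧ p ∣ (i - j)
      · rw [if_pos c1, if_pos c2]
      · exact absurd ⟨by omega, c1.2.1, by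
          have h1 : i - j = (i - (j + p)) + p := by omega
          rw [h1]; exact dvd_add c1.2.2 dvd_rfl⟩ c2
      · exfalso
        have hlt : j < i := lt_of_le_of_ne c2.1 (Ne.symm hij)
        have hge : j + p ≤ i := by
          have := Nat.le_of_dvd (by omega) c2.2.2
          omega
        exact c1 ⟨hge, c2.2.1, by
          have h1 : i - (j + p) = (i - j) - p := by omega
          rw [h1]; exact Nat.dvd_sub c2.2.2 dvd_rfl⟩
      · rw [if_neg c1, if_neg c2]
  | case2 j s h =>
    have hj : N < j := by omega
    have : ¬ (j ≤ i ∧ i ≤ N ∧ p ∣ (i - j)) := by rintro ⟨a, b, _⟩; omega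
    simp [this]

def crossedBelow (p i : Nat) : Prop := ∃ q, 2 ≤ q ∧ q < p ∧ q ∣ i ∧ q * q ≤ i

theorem sieveLoop_correct (N p : Nat) (s : List Bool) (hp : 2 ≤ p)
    (hinv : ∀ i, i ≤ N → (s.getD i false = true ↔ 2 ≤ i ∧ ¬ crossedBelow p i)) :
    ∀ i, i ≤ N → ((sieveLoop N p s).getD i false = true ↔ i.Prime) := by
  revert hp hinv
  fun_induction sieveLoop N p s with
  | case1 p s h ih =>
    intro hp hinv
    have hpN : p ≤ N := by
      have : p ≤ p * p := Nat.le_mul_of_pos_left p (by omega)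
      omega
    apply ih (by omega)
    -- establish invariant for p+1 on the updated list
    have hstep : crossedBelow p p → ∀ i, crossedBelow (p + 1) i ↔ crossedBelow p i := by
      intro ⟨q, hq2, hqp, hqdvd, hqsq⟩ i
      constructor
      · rintro ⟨r, hr2, hrp1, hrdvd, hrsq⟩
        by_cases hrp : r < p
        · exact ⟨r, hr2, hrp, hrdvd, hrsq⟩
        · have hrq : r = p := by omega
          rw [hrq] at hrdvd hrsq
          exact ⟨q, hq2, hqp, hqdvd.trans hrdvd, by
            have h1 : p ≤ p * p := Nat.le_mul_of_pos_left p (by omega)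
            omega⟩
      · rintro ⟨r, hr2, hrp, hrdvd, hrsq⟩; exact ⟨r, hr2, by omega, hrdvd, hrsq⟩
    by_cases hsp : s.getD p false = true
    · rw [dif_pos hsp]
      have hpinfo := (hinv p hpN).mp hsp
      intro i hi
      rw [markMul_getD N p (p * p) s (by omega) i]
      by_cases hc : p * p ≤ i ∧ i ≤ N ∧ p ∣ (i - p * p)
      · simp only [hc]
        have hdvd : p ∣ i := by
          have h1 : i = (i - p * p) + p * p := by omega
          rw [h1]; exact Dvd.dvd.add hc.2.2 (Dvd.intro p rfl)
        have : crossedBelow (p + 1) i := ⟨p, hpinfo.1, by omega, hdvd, hc.1⟩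
        constructor
        · intro hfalse; exact absurd hfalse (by simp)
        · rintro ⟨_, hnc⟩; exact absurd this hnc
      · simp only [hc, if_false]
        rw [hinv i hi]
        have : crossedBelow (p + 1) i ↔ crossedBelow p i := by
          constructor
          · rintro ⟨r, hr2, hrp1, hrdvd, hrsq⟩
            by_cases hrp : r < p
            · exact ⟨r, hr2, hrp, hrdvd, hrsq⟩
            · have hreq : r = p := by omega
              rw [hreq] at hrdvd hrsq
              exfalso
              exact hc ⟨hrsq, hi, Nat.dvd_sub hrdvd (Dvd.intro p rfl)⟩
          · rintro ⟨r, hr2, hrp, hrdvd, hrsq⟩; exact ⟨r, hr2, by omega, hrdvd, hrsq⟩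
        rw [this]
    · rw [dif_neg hsp]
      have hcp : crossedBelow p p := by
        by_contra hnc
        exact hsp ((hinv p hpN).mpr ⟨hp, hnc⟩)
      intro i hi
      rw [hinv i hi, hstep hcp i]
  | case2 p s h =>
    intro hp hinv i hi
    rw [hinv i hi]
    constructor
    · rintro ⟨h2i, hnc⟩
      by_contra hnprime
      have hne1 : i ≠ 1 := by omega
      have hqprime := Nat.minFac_prime hne1
      have hqsq : i.minFac ^ 2 ≤ i := Nat.minFac_sq_le_self (by omega) hnprime
      have hqsq' : i.minFac * i.minFac ≤ i := by rw [← pow_two]; exact hqsq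
      have hqlt : i.minFac < p := by
        by_contra hge
        have hge2 : p ≤ i.minFac := Nat.le_of_not_lt hge
        have : p * p ≤ i.minFac * i.minFac := Nat.mul_le_mul hge2 hge2
        omega
      exact hnc ⟨i.minFac, hqprime.two_le, hqlt, Nat.minFac_dvd i, hqsq'⟩
    · intro hprime
      refine ⟨hprime.two_le, ?_⟩
      rintro ⟨q, hq2, hqp, hqdvd, hqsq⟩
      rcases hprime.eq_one_or_self_of_dvd q hqdvd with h1 | h1
      · omega
      · subst h1
        have := Nat.mul_le_mul_right q (show 2 ≤ q from hq2)
        omega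

theorem isPrimeLoop_correct (m d : Nat) (hm : 2 ≤ m) (hd : 2 ≤ d)
    (hinv : ∀ e, 2 ≤ e → e < d → ¬ e ∣ m) : (isPrimeLoop m d = true ↔ m.Prime) := by
  revert hd hinv
  fun_induction isPrimeLoop m d with
  | case1 d h hmod =>
    intro hd hinv
    simp only [Bool.false_eq_true, false_iff]
    intro hprime
    have hdvd : d ∣ m := Nat.dvd_of_mod_eq_zero hmod
    rcases hprime.eq_one_or_self_of_dvd d hdvd with h1 | h1
    · omega
    · subst h1
      have := Nat.mul_le_mul_right d (show 2 ≤ d from hd)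
      omega
  | case2 d h hmod ih =>
    intro hd hinv
    apply ih (by omega)
    intro e he2 hed
    by_cases hede : e < d
    · exact hinv e he2 hede
    · have : e = d := by omega
      subst this
      intro hdvd
      rcases hdvd with ⟨k, rfl⟩
      exact hmod (Nat.mul_mod_right e k)
  | case3 d h =>
    intro hd hinv
    simp only [true_iff]
    rw [Nat.prime_def_le_sqrt]
    refine ⟨hm, ?_⟩
    intro e he2 hesqrt
    have hesq : e * e ≤ m := Nat.le_sqrt.mp hesqrt
    have : e < d := by
      by_contra hge
      have hge2 : d ≤ e := Nat.le_of_not_lt hge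
      have : d * d ≤ e * e := Nat.mul_le_mul hge2 hge2
      omega
    exact hinv e he2 this

theorem isPrimeB_eq (m : Nat) : isPrimeB m = true ↔ m.Prime := by
  unfold isPrimeB
  split_ifs with h
  · simp only [false_iff]
    intro hp; exact absurd hp.two_le (by omega)
  · exact isPrimeLoop_correct m 2 (by omega) (le_refl 2) (by intro e he2 he; omega)

theorem sieve0_getD (N i : Nat) :
    (((List.replicate (N + 1) true).set 0 false).set 1 false).getD i false
      = decide (2 ≤ i ∧ i ≤ N) := by
  simp only [List.getD, List.getElem?_set, List.getElem?_replicate, List.length_set,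
    List.length_replicate]
  split_ifs <;> simp_all <;> omega

theorem finalSieve_eq (N : Nat) (i : Nat) (hi : i ≤ N) :
    (sieveLoop N 2 (((List.replicate (N + 1) true).set 0 false).set 1 false)).getD i false
      = isPrimeB i := by
  rw [Bool.eq_iff_iff, isPrimeB_eq]
  apply sieveLoop_correct N 2 _ (le_refl 2) _ i hi
  intro j hj
  rw [sieve0_getD]
  simp only [decide_eq_true_eq]
  constructor
  · rintro ⟨h2, _⟩
    refine ⟨h2, ?_⟩
    rintro ⟨q, hq2, hq2', _, _⟩; omega
  · rintro ⟨h2, _⟩; exact ⟨h2, hj⟩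

theorem mainLoop_eq (N : Nat) (s : List Bool)
    (hs : ∀ i, i ≤ N → s.getD i false = isPrimeB i) :
    ∀ i total best, mainLoopA N s i total best = mainLoopB N i total best := by
  intro i total best
  fun_induction mainLoopA N s i total best with
  | case1 i total best h hlook t hbreak =>
    rw [mainLoopB, dif_pos h, ← hs i h, hlook, if_pos rfl]
    exact (if_pos (show N < total + i from hbreak)).symm
  | case2 i total best h hlook t hbreak ih =>
    have ht : s.getD (total + i) false = isPrimeB (total + i) := by
      have hb : ¬ N < total + i := hbreak
      exact hs _ (by omega)
    rw [mainLoopB, dif_pos h, ← hs i h, hlook, if_pos rfl,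
      if_neg (show ¬ N < total + i from hbreak), ← ht]
    exact ih
  | case3 i total best h hlook ih =>
    rw [mainLoopB, dif_pos h, ← hs i h, if_neg hlook]
    exact ih
  | case4 i total best h =>
    rw [mainLoopB, dif_neg h]

-- ===== VERDICT (by name: the statement is the Claim_ definition above) =====
theorem largestPrime_spec : Claim_equal_largestPrime := by
  intro n _
  unfold Spec_largestPrime largestPrime largestPrime_alt
  split_ifs with h
  · rfl
  · exact congrArg Int.ofNat (mainLoop_eq n.toNat _ (fun i hi => finalSieve_eq n.toNat i hi) 2 0 0)
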